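-- pv_equiv track=rewrite | github.com/cmblir/algorithm_korea | 프로그래머스/lv2/12914. 멀리 뛰기/멀리 뛰기.py | solution
-- ===== SOURCE A (Python) =====
-- def solution(n):
--     if n > 3:
--         tmp = [0] * (n + 1)
--         tmp[1] = 1
--         tmp[2] = 2
--         for i in range(3, n + 1):
--             tmp[i] = tmp[i - 1] + tmp[i - 2]
--         return tmp[n] % 1234567
--     else:
--         return n
-- ===== SOURCE B (Python) =====
-- def solution(n):
--     # Fast doubling Fibonacci mod 1234567: O(log n) instead of A's O(n) table.
--     if n <= 3:
--         return n
--     M = 1234567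
--
--     def fd(k):
--         # returns (F(k) % M, F(k+1) % M)
--         if k == 0:
--             return (0, 1)
--         a, b = fd(k >> 1)
--         c = a * (2 * b - a) % M
--         d = (a * a + b * b) % M
--         if k & 1:
--             return (d, (c + d) % M)
--         return (c, d)
--
--     return fd(n + 1)[0]
-- ===== Notes on version B (the rewrite author's own statement) =====
-- stated objective: faster
-- what changed: Replaces the O(n) DP table of bignum Fibonacci sums with recursive fast-doubling over modular residues, computing F(n+1) mod 1234567 in O(log n) multiplications.
import Mathlib
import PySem

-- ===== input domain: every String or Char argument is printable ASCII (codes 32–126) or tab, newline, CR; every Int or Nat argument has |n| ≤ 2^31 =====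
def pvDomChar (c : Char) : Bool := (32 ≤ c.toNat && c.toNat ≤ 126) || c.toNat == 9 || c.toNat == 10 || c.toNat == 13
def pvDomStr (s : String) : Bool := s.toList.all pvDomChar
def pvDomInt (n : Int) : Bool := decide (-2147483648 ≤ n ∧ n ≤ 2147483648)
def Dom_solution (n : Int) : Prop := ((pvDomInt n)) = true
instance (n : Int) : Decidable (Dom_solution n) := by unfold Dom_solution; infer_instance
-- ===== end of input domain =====

-- B replaces A's O(n) Fibonacci table with fast doubling on modular residues (O(log n)); same value everywhere.

-- ===== PORT A =====
-- The for-loop 'for i in range(3, n+1): tmp[i] = tmp[i-1] + tmp[i-2]' with the loop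
-- index carried as a Nat (all indices are ≥ 1 here, so Nat indexing is exact).
def fillA (t : List Int) (i stop : Nat) : List Int :=
  if i < stop then fillA (t.set i (t.getD (i - 1) 0 + t.getD (i - 2) 0)) (i + 1) stop else t
termination_by stop - i

def solution (n : Int) : Int :=
  if n > 3 then
    let tmp := ((List.replicate (n + 1).toNat 0).set 1 1).set 2 2
    let tmp := fillA tmp 3 (n + 1).toNat
    PySem.Int.mod (tmp.getD n.toNat 0) 1234567
  else n

-- ===== PORT B =====
-- fd k = (F(k) % M, F(k+1) % M) by fast doubling, recursing on k >> 1 (= k / 2 for Nat k).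
def fdB (M : Int) (k : Nat) : Int × Int :=
  if k = 0 then (0, 1)
  else
    let p := fdB M (k / 2)
    let a := p.1
    let b := p.2
    let c := PySem.Int.mod (a * (2 * b - a)) M
    let d := PySem.Int.mod (a * a + b * b) M
    if k % 2 = 1 then (d, PySem.Int.mod (c + d) M) else (c, d)
termination_by k
decreasing_by exact Nat.div_lt_self (Nat.pos_of_ne_zero (by assumption)) (by omega)

def solution_alt (n : Int) : Int :=
  if n ≤ 3 then n else (fdB 1234567 (n + 1).toNat).1

-- ===== PRECONDITION & SPEC =====
def Spec_solution (n : Int) (out : Int) : Prop := out = solution_alt n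
instance (n : Int) (out : Int) : Decidable (Spec_solution n out) := by unfold Spec_solution; infer_instance

-- ===== CLAIM (what is proved, stated in full; the proofs are below) =====
def Claim_equal_solution : Prop := ∀ (n : Int), Dom_solution n → Spec_solution n (solution n)

-- ===== LEMMAS AND PROOFS =====

-- Fibonacci cast to Int (A's tmp[k] = F(k+1); B computes F mod M).
def fibZ (k : Nat) : Int := (Nat.fib k : Int)

lemma fibZ_add_two (k : Nat) : fibZ (k + 2) = fibZ (k + 1) + fibZ k := by
  simp [fibZ, Nat.fib_add_two]; ring

lemma fibZ_two_mul (m : Nat) : fibZ (2 * m) = fibZ m * (2 * fibZ (m + 1) - fibZ m) := by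
  have h : Nat.fib m ≤ 2 * Nat.fib (m + 1) :=
    le_trans (Nat.fib_le_fib_succ) (by omega)
  simp only [fibZ]
  rw [Nat.fib_two_mul]
  push_cast [h]
  ring

lemma fibZ_two_mul_add_one (m : Nat) :
    fibZ (2 * m + 1) = fibZ m * fibZ m + fibZ (m + 1) * fibZ (m + 1) := by
  simp only [fibZ]
  rw [Nat.fib_two_mul_add_one]
  push_cast
  ring

lemma pymod_pos (a : Int) : PySem.Int.mod a 1234567 = a % 1234567 :=
  PySem.Int.mod_eq_emod_of_pos (by norm_num)

lemma modeq_emod (a : Int) : a % 1234567 ≡ a [ZMOD 1234567] :=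
  Int.emod_emod_of_dvd a dvd_rfl

-- fast-doubling correctness: fdB M k = (F k % M, F (k+1) % M)
lemma fdB_spec (k : Nat) :
    fdB 1234567 k = (fibZ k % 1234567, fibZ (k + 1) % 1234567) := by
  induction k using Nat.strong_induction_on with
  | _ k ih =>
    rw [fdB]
    by_cases h0 : k = 0
    · subst h0; simp [fibZ]
    · simp only [h0, if_false]
      have ihm := ih (k / 2) (Nat.div_lt_self (Nat.pos_of_ne_zero h0) (by omega))
      set m := k / 2 with hm
      rw [ihm]
      simp only [pymod_pos]
      have ha := modeq_emod (fibZ m)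
      have hb := modeq_emod (fibZ (m + 1))
      have hc : fibZ m % 1234567 * (2 * (fibZ (m + 1) % 1234567) - fibZ m % 1234567) % 1234567
          = fibZ (2 * m) % 1234567 := by
        rw [fibZ_two_mul]
        exact ha.mul (((Int.ModEq.refl 2).mul hb).sub ha)
      have hd : (fibZ m % 1234567 * (fibZ m % 1234567) + fibZ (m + 1) % 1234567 * (fibZ (m + 1) % 1234567)) % 1234567
          = fibZ (2 * m + 1) % 1234567 := by
        rw [fibZ_two_mul_add_one]
        exact (ha.mul ha).add (hb.mul hb)
      by_cases hp : k % 2 = 1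
      · have hk : k = 2 * m + 1 := by omega
        rw [if_pos hp, hc, hd, hk]
        have hcd : (fibZ (2 * m) % 1234567 + fibZ (2 * m + 1) % 1234567) % 1234567
            = fibZ (2 * m + 1 + 1) % 1234567 := by
          have : fibZ (2 * m + 1 + 1) = fibZ (2 * m + 1) + fibZ (2 * m) := fibZ_add_two (2 * m)
          rw [this]
          exact ((modeq_emod (fibZ (2 * m))).add (modeq_emod (fibZ (2 * m + 1)))).trans
            (by rw [Int.add_comm])
        rw [hcd]
      · have hk : k = 2 * m := by omega
        rw [if_neg hp, hc, hd, hk]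

-- A's loop invariant: entering iteration i with tmp[i-1] = F(i), tmp[i-2] = F(i-1)
-- yields tmp[N-1] = F(N) at loop exit.
lemma fillA_spec (k : Nat) : ∀ (t : List Int) (i N : Nat), i + k = N → 3 ≤ i →
    N ≤ t.length → t.getD (i - 1) 0 = fibZ i → t.getD (i - 2) 0 = fibZ (i - 1) →
    (fillA t i N).getD (N - 1) 0 = fibZ N := by
  induction k with
  | zero =>
    intro t i N hiN h3 hlen h1 h2
    rw [fillA]
    have hnl : ¬ i < N := by omega
    simp only [hnl, if_false]
    have : i = N := by omega
    subst this; exact h1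
  | succ k ih =>
    intro t i N hiN h3 hlen h1 h2
    rw [fillA]
    have hlt : i < N := by omega
    simp only [hlt, if_true]
    set t' := t.set i (t.getD (i - 1) 0 + t.getD (i - 2) 0) with ht'
    have hilen : i < t.length := by omega
    have hlen' : N ≤ t'.length := by simp [ht', hlen]
    apply ih t' (i + 1) N (by omega) (by omega) hlen'
    · -- t'[(i+1)-1] = t'[i] = F(i) + F(i-1) = F(i+1)
      have hset : t'.getD i 0 = t.getD (i - 1) 0 + t.getD (i - 2) 0 := by
        rw [ht', List.getD_eq_getElem?_getD, List.getElem?_set_self hilen]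
        rfl
      rw [Nat.add_sub_cancel, hset, h1, h2]
      obtain ⟨j, hj⟩ : ∃ j, i = j + 1 := ⟨i - 1, by omega⟩
      subst hj
      rw [Nat.add_sub_cancel]
      exact (fibZ_add_two j).symm
    · -- t'[(i+1)-2] = t'[i-1] = t[i-1] = F(i)
      have e1 : i + 1 - 2 = i - 1 := by omega
      have e2 : i + 1 - 1 = i := by omega
      have hne : i ≠ i - 1 := by omega
      rw [e1, e2, ht', List.getD_eq_getElem?_getD, List.getElem?_set_ne hne,
        ← List.getD_eq_getElem?_getD, h1]

lemma solution_big (n : Int) (h : n > 3) :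
    solution n = fibZ (n.toNat + 1) % 1234567 := by
  have h4 : (4 : Nat) ≤ n.toNat := by omega
  have hN : (n + 1).toNat = n.toNat + 1 := by omega
  have hg1 : (((List.replicate (n.toNat + 1) (0:Int)).set 1 1).set 2 2).getD 2 0 = fibZ 3 := by
    have h2 : (2:Nat) < ((List.replicate (n.toNat + 1) (0:Int)).set 1 1).length := by simp; omega
    rw [List.getD_eq_getElem?_getD, List.getElem?_set_self h2]
    simp only [Option.getD_some]
    decide
  have hg2 : (((List.replicate (n.toNat + 1) (0:Int)).set 1 1).set 2 2).getD 1 0 = fibZ 2 := by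
    have h1 : (1:Nat) < (List.replicate (n.toNat + 1) (0:Int)).length := by simp; omega
    rw [List.getD_eq_getElem?_getD, List.getElem?_set_ne (by omega : (2:Nat) ≠ 1),
      List.getElem?_set_self h1]
    simp only [Option.getD_some]
    decide
  have hfill := fillA_spec (n.toNat + 1 - 3)
    (((List.replicate (n.toNat + 1) (0:Int)).set 1 1).set 2 2) 3 (n.toNat + 1)
    (by omega) (by omega) (by simp) hg1 hg2
  rw [Nat.add_sub_cancel] at hfill
  simp only [solution, h, if_true, pymod_pos, hN, hfill]

-- ===== VERDICT (by name: the statement is the Claim_ definition above) =====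
theorem solution_spec : Claim_equal_solution := by
  intro n _
  unfold Spec_solution solution_alt
  by_cases h : n ≤ 3
  · have hng : ¬ n > 3 := by omega
    simp [solution, hng, h]
  · have hgt : n > 3 := by omega
    have hN : (n + 1).toNat = n.toNat + 1 := by omega
    rw [if_neg h, solution_big n hgt, hN, fdB_spec]
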